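-- pv_equiv track=rewrite | github.com/mtc-jordan/ai-ceo-saas-platform | apps/api-gateway/app/services/predictive_analytics_service.py | _get_retention_actions
-- ===== SOURCE A (Python) =====
-- from typing import List, Dict, Any, Optional, Tuple
--
-- def _get_retention_actions(risk_factors: List[Dict]) -> List[str]:
--     """Get recommended retention actions based on risk factors"""
--     actions = []
--
--     factor_names = [f["factor"] for f in risk_factors]
--
--     if "Significant usage decline" in factor_names or "Moderate usage decline" in factor_names:
--         actions.append("Schedule a check-in call to understand usage challenges")
--         actions.append("Offer personalized training or onboarding refresh")
--
--     if "High support ticket volume" in factor_names: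
--         actions.append("Escalate to customer success for proactive outreach")
--         actions.append("Review and address recurring issues")
--
--     if "Payment failures" in factor_names:
--         actions.append("Contact customer about payment method update")
--         actions.append("Offer flexible payment options if needed")
--
--     if "Low engagement" in factor_names:
--         actions.append("Send re-engagement campaign with feature highlights")
--         actions.append("Offer incentive for increased platform usage")
--
--     if "Low satisfaction score" in factor_names:
--         actions.append("Schedule executive sponsor call")
--         actions.append("Create custom success plan")
--
--     if not actions:
--         actions.append("Continue regular engagement cadence")
--         actions.append("Monitor for any changes in behavior")
--
--     return actions
-- ===== SOURCE B (Python) =====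
-- def _get_retention_actions(risk_factors):
--     """Get recommended retention actions based on risk factors"""
--     CATEGORY = {
--         "Significant usage decline": 0,
--         "Moderate usage decline": 0,
--         "High support ticket volume": 1,
--         "Payment failures": 2,
--         "Low engagement": 3,
--         "Low satisfaction score": 4,
--     }
--     ACTIONS = [
--         ["Schedule a check-in call to understand usage challenges",
--          "Offer personalized training or onboarding refresh"],
--         ["Escalate to customer success for proactive outreach",
--          "Review and address recurring issues"],
--         ["Contact customer about payment method update",
--          "Offer flexible payment options if needed"],
--         ["Send re-engagement campaign with feature highlights",
--          "Offer incentive for increased platform usage"],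
--         ["Schedule executive sponsor call",
--          "Create custom success plan"],
--     ]
--     hit = [False] * 5
--     for f in risk_factors:
--         idx = CATEGORY.get(f["factor"])
--         if idx is not None:
--             hit[idx] = True
--     actions = [a for i, flag in enumerate(hit) if flag for a in ACTIONS[i]]
--     return actions or ["Continue regular engagement cadence",
--                        "Monitor for any changes in behavior"]
-- ===== Notes on version B (the rewrite author's own statement) =====
-- stated objective: alternative
-- what changed: Inverts the data flow: instead of six membership scans of a factor-name list, B classifies each risk factor in one pass through an inverted index (factor name -> category), marks a 5-slot hit array, and emits the actions of the hit categories in category order, with the fallback when nothing was hit.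
import Mathlib
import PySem

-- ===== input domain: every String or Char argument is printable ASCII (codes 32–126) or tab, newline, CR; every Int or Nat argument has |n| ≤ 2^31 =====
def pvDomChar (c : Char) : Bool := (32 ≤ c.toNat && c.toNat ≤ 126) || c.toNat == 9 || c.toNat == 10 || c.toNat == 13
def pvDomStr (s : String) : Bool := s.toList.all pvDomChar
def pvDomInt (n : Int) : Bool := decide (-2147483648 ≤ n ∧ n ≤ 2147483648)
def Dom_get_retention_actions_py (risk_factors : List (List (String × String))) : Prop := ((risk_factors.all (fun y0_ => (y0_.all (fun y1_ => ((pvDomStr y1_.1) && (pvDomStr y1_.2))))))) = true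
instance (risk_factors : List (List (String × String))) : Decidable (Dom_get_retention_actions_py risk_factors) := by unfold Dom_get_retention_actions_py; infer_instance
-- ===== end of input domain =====

-- B inverts the data flow: one pass classifying each factor through a name->category
-- index into a 5-slot hit array, then emitting actions per hit category (alternative).

-- ===== PORT A =====
-- f["factor"] for each dict; under Pre_ every dict has the key, so getD "" never fires.
def get_retention_actions_py (risk_factors : List (List (String × String))) : List String :=
  let factor_names := risk_factors.map (fun f => ((PySem.Dict.mk f).get? "factor").getD "")
  let actions : List String := []
  let actions := if factor_names.contains "Significant usage decline" || factor_names.contains "Moderate usage decline" then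
      actions ++ ["Schedule a check-in call to understand usage challenges",
                  "Offer personalized training or onboarding refresh"] else actions
  let actions := if factor_names.contains "High support ticket volume" then
      actions ++ ["Escalate to customer success for proactive outreach",
                  "Review and address recurring issues"] else actions
  let actions := if factor_names.contains "Payment failures" then
      actions ++ ["Contact customer about payment method update",
                  "Offer flexible payment options if needed"] else actions
  let actions := if factor_names.contains "Low engagement" then
      actions ++ ["Send re-engagement campaign with feature highlights",
                  "Offer incentive for increased platform usage"] else actions
  let actions := if factor_names.contains "Low satisfaction score" then
      actions ++ ["Schedule executive sponsor call",
                  "Create custom success plan"] else actions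
  if actions.isEmpty then
    actions ++ ["Continue regular engagement cadence",
                "Monitor for any changes in behavior"]
  else actions

-- ===== PORT B =====
-- CATEGORY dict (inverted index: factor name -> category slot)
def pvCategory : PySem.Dict String Nat :=
  PySem.Dict.mk
    [("Significant usage decline", 0), ("Moderate usage decline", 0),
     ("High support ticket volume", 1), ("Payment failures", 2),
     ("Low engagement", 3), ("Low satisfaction score", 4)]

def pvActions : List (List String) :=
  [["Schedule a check-in call to understand usage challenges",
    "Offer personalized training or onboarding refresh"],
   ["Escalate to customer success for proactive outreach",
    "Review and address recurring issues"],
   ["Contact customer about payment method update",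
    "Offer flexible payment options if needed"],
   ["Send re-engagement campaign with feature highlights",
    "Offer incentive for increased platform usage"],
   ["Schedule executive sponsor call",
    "Create custom success plan"]]

def get_retention_actions_py_alt (risk_factors : List (List (String × String))) : List String :=
  let hit := risk_factors.foldl
    (fun (h : List Bool) f =>
      match pvCategory.get? (((PySem.Dict.mk f).get? "factor").getD "") with
      | some idx => h.set idx true
      | none => h)
    [false, false, false, false, false]
  let actions := (hit.zipIdx.filter (fun p => p.1)).flatMap (fun p => pvActions.getD p.2 [])
  if actions.isEmpty then
    ["Continue regular engagement cadence", "Monitor for any changes in behavior"]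
  else actions

-- ===== PRECONDITION & SPEC =====
-- Pre_ excludes exactly the inputs where A (and B) raise KeyError: a risk-factor dict without a "factor" key.
def Pre_get_retention_actions_py (risk_factors : List (List (String × String))) : Prop :=
  ∀ f ∈ risk_factors, (PySem.Dict.mk f).contains "factor" = true
instance (risk_factors : List (List (String × String))) : Decidable (Pre_get_retention_actions_py risk_factors) := by unfold Pre_get_retention_actions_py; infer_instance
def pvWitness_get_retention_actions_py : (List (List (String × String))) :=
  [[("factor", "Low engagement")], [("factor", "Payment failures")]]

def Spec_get_retention_actions_py (risk_factors : List (List (String × String))) (out : List String) : Prop := out = get_retention_actions_py_alt risk_factors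
instance (risk_factors : List (List (String × String))) (out : List String) : Decidable (Spec_get_retention_actions_py risk_factors out) := by unfold Spec_get_retention_actions_py; infer_instance

-- ===== CLAIM (what is proved, stated in full; the proofs are below) =====
def Claim_equal_get_retention_actions_py : Prop := ∀ (risk_factors : List (List (String × String))), Dom_get_retention_actions_py risk_factors → Pre_get_retention_actions_py risk_factors → Spec_get_retention_actions_py risk_factors (get_retention_actions_py risk_factors)

-- ===== LEMMAS AND PROOFS =====

-- pvCategory.get? as an if-chain (dict lookup characterisation).
theorem pv_hget (n : String) : pvCategory.get? n =
    (if "Significant usage decline" = n then some 0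
     else if "Moderate usage decline" = n then some 0
     else if "High support ticket volume" = n then some 1
     else if "Payment failures" = n then some 2
     else if "Low engagement" = n then some 3
     else if "Low satisfaction score" = n then some 4
     else none) := by
  simp only [pvCategory, PySem.Dict.get?, List.find?]
  repeat' split <;> simp_all

-- B's hit array after the full pass, characterised per slot against A's name list.
theorem pv_fold_hit (rf : List (List (String × String))) (a b c d e : Bool) :
    rf.foldl
      (fun (h : List Bool) f =>
        match pvCategory.get? (((PySem.Dict.mk f).get? "factor").getD "") with
        | some idx => h.set idx true
        | none => h)
      [a, b, c, d, e]
    = [a || ((rf.map (fun f => ((PySem.Dict.mk f).get? "factor").getD "")).contains "Significant usage decline"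
            || (rf.map (fun f => ((PySem.Dict.mk f).get? "factor").getD "")).contains "Moderate usage decline"),
       b || (rf.map (fun f => ((PySem.Dict.mk f).get? "factor").getD "")).contains "High support ticket volume",
       c || (rf.map (fun f => ((PySem.Dict.mk f).get? "factor").getD "")).contains "Payment failures",
       d || (rf.map (fun f => ((PySem.Dict.mk f).get? "factor").getD "")).contains "Low engagement",
       e || (rf.map (fun f => ((PySem.Dict.mk f).get? "factor").getD "")).contains "Low satisfaction score"] := by
  induction rf generalizing a b c d e with
  | nil => simp
  | cons f fs ih =>
    simp only [List.foldl_cons, List.map_cons, List.contains_cons]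
    generalize (((PySem.Dict.mk f).get? "factor").getD "") = n
    rw [pv_hget n]
    split_ifs with h1 h2 h3 h4 h5 h6
    · subst h1; simp only [List.set_cons_zero]; rw [ih]; simp [Bool.or_comm]
    · subst h2; simp only [List.set_cons_zero]; rw [ih]; simp [Bool.or_comm]
    · subst h3; simp only [List.set_cons_succ, List.set_cons_zero]; rw [ih]; simp [Bool.or_comm]
    · subst h4; simp only [List.set_cons_succ, List.set_cons_zero]; rw [ih]; simp [Bool.or_comm]
    · subst h5; simp only [List.set_cons_succ, List.set_cons_zero]; rw [ih]; simp [Bool.or_comm]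
    · subst h6; simp only [List.set_cons_succ, List.set_cons_zero]; rw [ih]; simp [Bool.or_comm]
    · rw [ih]
      simp [beq_eq_false_iff_ne.mpr h1, beq_eq_false_iff_ne.mpr h2,
            beq_eq_false_iff_ne.mpr h3, beq_eq_false_iff_ne.mpr h4,
            beq_eq_false_iff_ne.mpr h5, beq_eq_false_iff_ne.mpr h6]

-- ===== VERDICT (by name: the statement is the Claim_ definition above) =====
theorem get_retention_actions_py_spec : Claim_equal_get_retention_actions_py := by
  intro rf _ _
  show get_retention_actions_py rf = get_retention_actions_py_alt rf
  simp only [get_retention_actions_py, get_retention_actions_py_alt]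
  rw [pv_fold_hit]
  generalize (rf.map (fun f => ((PySem.Dict.mk f).get? "factor").getD "")).contains "Significant usage decline" = b1
  generalize (rf.map (fun f => ((PySem.Dict.mk f).get? "factor").getD "")).contains "Moderate usage decline" = b2
  generalize (rf.map (fun f => ((PySem.Dict.mk f).get? "factor").getD "")).contains "High support ticket volume" = b3
  generalize (rf.map (fun f => ((PySem.Dict.mk f).get? "factor").getD "")).contains "Payment failures" = b4
  generalize (rf.map (fun f => ((PySem.Dict.mk f).get? "factor").getD "")).contains "Low engagement" = b5
  generalize (rf.map (fun f => ((PySem.Dict.mk f).get? "factor").getD "")).contains "Low satisfaction score" = b6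
  cases b1 <;> cases b2 <;> cases b3 <;> cases b4 <;> cases b5 <;> cases b6 <;> rfl
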